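-- pv_equiv track=rewrite | github.com/hanzlma/interpreter | operators.py | SplitByOperators
-- ===== SOURCE A (Python) =====
-- operators = {
--     "plus" : '+',
--     "minus": '-',
--     "multiply": '*',
--     "divide": '/',
--     "and": '&&',
--     "or": '||'
-- }
--
-- def SplitByOperators(string: str) -> list[str]:
--     split1 = string.split(operators['plus'])
--     split2: list[str] = []
--     for x in split1:
--         split2.extend(x.split(operators['minus']))
--     split3: list[str] = []
--     for x in split2:
--         split3.extend(x.split(operators['multiply']))
--     split4: list[str] = []
--     for x in split3:
--         split4.extend(x.split(operators['divide']))
--     output: list[str] = []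
--     for x in split4:
--         output.append(x.strip())
--     return output
-- ===== SOURCE B (Python) =====
-- def SplitByOperators(string: str) -> list[str]:
--     output: list[str] = []
--     buf: list[str] = []
--     for ch in string:
--         if ch in "+-*/":
--             output.append("".join(buf).strip())
--             buf = []
--         else:
--             buf.append(ch)
--     output.append("".join(buf).strip())
--     return output
-- ===== Notes on version B (the rewrite author's own statement) =====
-- stated objective: alternative
-- what changed: A makes four sequential str.split passes (one per arithmetic operator character) plus a fifth strip pass over the fragments; B is a single left-to-right character scan with a token buffer that emits each stripped token when it meets an operator character.
import Mathlib
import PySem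

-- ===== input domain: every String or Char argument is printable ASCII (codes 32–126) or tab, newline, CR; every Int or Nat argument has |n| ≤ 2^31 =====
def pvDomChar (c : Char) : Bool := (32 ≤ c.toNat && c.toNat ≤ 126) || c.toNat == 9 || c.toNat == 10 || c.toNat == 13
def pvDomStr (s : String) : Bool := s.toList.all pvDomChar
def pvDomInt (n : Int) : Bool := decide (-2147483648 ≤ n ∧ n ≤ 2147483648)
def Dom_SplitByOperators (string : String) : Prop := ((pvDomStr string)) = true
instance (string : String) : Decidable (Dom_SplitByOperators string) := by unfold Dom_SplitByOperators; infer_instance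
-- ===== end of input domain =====

-- B replaces A's four sequential str.split passes plus a final strip pass by one
-- left-to-right character scan with a token buffer (objective: alternative, one pass).

-- ===== PORT A =====
-- the module-level dict A reads its delimiters from
def pvOperators : PySem.Dict String String :=
  (((((PySem.Dict.empty.insert "plus" "+").insert "minus" "-").insert "multiply" "*").insert
      "divide" "/").insert "and" "&&").insert "or" "||"

-- x.split(sep) for the nonempty literal separators used here (split? is some, getD never fires)
def pySplit (x : String) (sep : String) : List String :=
  (PySem.Str.split? x sep).getD []

def SplitByOperators (string : String) : List String :=
  let split1 := pySplit string ((pvOperators.get? "plus").getD "")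
  let split2 := split1.foldl (fun acc x => acc ++ pySplit x ((pvOperators.get? "minus").getD "")) []
  let split3 := split2.foldl (fun acc x => acc ++ pySplit x ((pvOperators.get? "multiply").getD "")) []
  let split4 := split3.foldl (fun acc x => acc ++ pySplit x ((pvOperators.get? "divide").getD "")) []
  let output := split4.foldl (fun acc x => acc ++ [PySem.Str.strip x]) []
  output

-- ===== PORT B =====
-- one scan: (output so far, current buffer); 'ch in "+-*/"' = membership in those chars
def SplitByOperators_alt (string : String) : List String :=
  let st := string.toList.foldl
    (fun (st : List String × List Char) ch =>
      if ("+-*/".toList.contains ch) then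
        (st.1 ++ [PySem.Str.strip (String.ofList st.2)], [])
      else
        (st.1, st.2 ++ [ch]))
    ([], [])
  st.1 ++ [PySem.Str.strip (String.ofList st.2)]

-- ===== PRECONDITION & SPEC =====
def Spec_SplitByOperators (string : String) (out : List String) : Prop := out = SplitByOperators_alt string
instance (string : String) (out : List String) : Decidable (Spec_SplitByOperators string out) := by unfold Spec_SplitByOperators; infer_instance

-- ===== CLAIM (what is proved, stated in full; the proofs are below) =====
def Claim_equal_SplitByOperators : Prop := ∀ (string : String), Dom_SplitByOperators string → Spec_SplitByOperators string (SplitByOperators string)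

-- ===== LEMMAS AND PROOFS =====

-- (first token, later tokens) of splitting a char list at every char satisfying p
def splitPair (p : Char → Bool) : List Char → List Char × List (List Char)
  | [] => ([], [])
  | c :: rest =>
      let r := splitPair p rest
      if p c then ([], r.1 :: r.2) else (c :: r.1, r.2)

theorem splitOn_go_single (c : Char) (l : List Char) (fuel : Nat) (cur : List Char)
    (acc : List (List Char)) (h : l.length ≤ fuel) :
    PySem.Chars.splitOn.go [c] fuel l cur acc =
      acc.reverse ++ ((cur.reverse ++ (splitPair (· == c) l).1) :: (splitPair (· == c) l).2) := by
  induction l generalizing fuel cur acc with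
  | nil =>
      cases fuel <;> simp [PySem.Chars.splitOn.go, splitPair]
  | cons d rest ih =>
      cases fuel with
      | zero => simp at h
      | succ f =>
        have hgo : PySem.Chars.splitOn.go [c] (f + 1) (d :: rest) cur acc =
            if [c].isPrefixOf (d :: rest) then
              PySem.Chars.splitOn.go [c] f (List.drop [c].length (d :: rest)) [] (cur.reverse :: acc)
            else PySem.Chars.splitOn.go [c] f rest (d :: cur) acc := rfl
        rw [hgo]
        simp only [List.length_cons, Nat.add_le_add_iff_right] at h
        by_cases hd : c = d
        · subst hd
          rw [if_pos (by simp [List.isPrefixOf])]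
          simp only [List.length_cons, List.length_nil, Nat.zero_add, List.drop_succ_cons,
            List.drop_zero]
          rw [ih f [] (cur.reverse :: acc) h]
          simp [splitPair]
        · have hdc : (d == c) = false := by
            simp only [beq_eq_false_iff_ne, ne_eq]; exact fun e => hd e.symm
          rw [if_neg (by simp [List.isPrefixOf, hd])]
          rw [ih f (d :: cur) acc h]
          simp [splitPair, hdc]

theorem splitOn_single (c : Char) (l : List Char) :
    PySem.Chars.splitOn l [c] = (splitPair (· == c) l).1 :: (splitPair (· == c) l).2 := by
  unfold PySem.Chars.splitOn
  rw [splitOn_go_single c l (l.length + 1) [] [] (by omega)]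
  simp

-- splitPair only depends on the predicate pointwise
theorem splitPair_congr {p q : Char → Bool} (h : ∀ c, p c = q c) (l : List Char) :
    splitPair p l = splitPair q l := by
  induction l with
  | nil => rfl
  | cons c rest ih => simp [splitPair, ih, h c]

-- merging: splitting by p then each fragment by q = splitting by (p or q)
theorem splitPair_merge_pair (p q : Char → Bool) (l : List Char) :
    splitPair (fun c => p c || q c) l =
      ((splitPair q (splitPair p l).1).1,
       (splitPair q (splitPair p l).1).2 ++
         List.flatMap (fun t => (splitPair q t).1 :: (splitPair q t).2) (splitPair p l).2) := by
  induction l with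
  | nil => simp [splitPair]
  | cons c rest ih =>
      by_cases hp : p c
      · simp [splitPair, hp, ih]
      · by_cases hq : q c
        · simp [splitPair, hp, hq, ih]
        · simp [splitPair, hp, hq, ih]

theorem splitPair_merge (p q : Char → Bool) (l : List Char) :
    List.flatMap (fun t => (splitPair q t).1 :: (splitPair q t).2)
        ((splitPair p l).1 :: (splitPair p l).2) =
      (splitPair (fun c => p c || q c) l).1 :: (splitPair (fun c => p c || q c) l).2 := by
  rw [splitPair_merge_pair p q l]
  simp

-- pySplit on a string built from a char list, single-char separator
theorem pySplit_ofList (t : List Char) (c : Char) :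
    pySplit (String.ofList t) (String.ofList [c]) =
      ((splitPair (· == c) t).1 :: (splitPair (· == c) t).2).map String.ofList := by
  unfold pySplit PySem.Str.split? PySem.Chars.split?
  simp [String.toList_ofList, splitOn_single]

-- one extend-pass of A over string fragments, at the char-list level
theorem chainA (c : Char) (pieces : List (List Char)) :
    List.foldl (fun acc x => acc ++ pySplit x (String.ofList [c])) [] (pieces.map String.ofList) =
      (List.flatMap (fun t => (splitPair (· == c) t).1 :: (splitPair (· == c) t).2) pieces).map
        String.ofList := by
  rw [PySem.List.foldl_append_eq_flatMap, List.nil_append, List.flatMap_map]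
  simp only [pySplit_ofList, List.map_flatMap]

-- A's final strip pass, at the char-list level
theorem stripChain (pieces : List (List Char)) :
    List.foldl (fun acc x => acc ++ [PySem.Str.strip x]) [] (pieces.map String.ofList) =
      pieces.map (fun t => PySem.Str.strip (String.ofList t)) := by
  rw [PySem.List.foldl_append_eq_flatMap, List.nil_append, List.flatMap_map]
  induction pieces <;> simp_all

-- the A-side chain characterised: A = strip each fragment of the four-way split
theorem A_char (l : List Char) :
    SplitByOperators (String.ofList l) =
      (((splitPair (fun c => ((c == '+' || c == '-') || c == '*') || c == '/') l).1 ::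
          (splitPair (fun c => ((c == '+' || c == '-') || c == '*') || c == '/') l).2).map
        (fun t => PySem.Str.strip (String.ofList t))) := by
  have hplus : (pvOperators.get? "plus").getD "" = String.ofList ['+'] := by decide
  have hminus : (pvOperators.get? "minus").getD "" = String.ofList ['-'] := by decide
  have hmul : (pvOperators.get? "multiply").getD "" = String.ofList ['*'] := by decide
  have hdiv : (pvOperators.get? "divide").getD "" = String.ofList ['/'] := by decide
  simp only [SplitByOperators, hplus, hminus, hmul, hdiv, pySplit_ofList, chainA,
    splitPair_merge, stripChain]

-- the B-side scan characterised by the same splitPair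
theorem B_scan (p : Char → Bool) (l : List Char) (out : List String) (buf : List Char) :
    (l.foldl
        (fun (st : List String × List Char) ch =>
          if p ch then (st.1 ++ [PySem.Str.strip (String.ofList st.2)], ([] : List Char))
          else (st.1, st.2 ++ [ch])) (out, buf)).1 ++
      [PySem.Str.strip (String.ofList
        (l.foldl
          (fun (st : List String × List Char) ch =>
            if p ch then (st.1 ++ [PySem.Str.strip (String.ofList st.2)], ([] : List Char))
            else (st.1, st.2 ++ [ch])) (out, buf)).2)] =
      out ++ (((buf ++ (splitPair p l).1) :: (splitPair p l).2).map
        (fun t => PySem.Str.strip (String.ofList t))) := by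
  induction l generalizing out buf with
  | nil => simp [splitPair]
  | cons c rest ih =>
      by_cases hc : p c
      · simp only [List.foldl_cons, hc, if_pos, splitPair]
        rw [ih (out ++ [PySem.Str.strip (String.ofList buf)]) []]
        simp
      · simp only [List.foldl_cons, hc, Bool.false_eq_true, if_neg, not_false_eq_true, splitPair]
        rw [ih out (buf ++ [c])]
        simp

-- the two delimiter predicates agree pointwise
theorem pred_eq (c : Char) :
    (((c == '+' || c == '-') || c == '*') || c == '/') = ("+-*/".toList.contains c) := by
  have hl : "+-*/".toList = ['+', '-', '*', '/'] := by decide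
  rw [hl]
  by_cases h1 : c = '+' <;> by_cases h2 : c = '-' <;> by_cases h3 : c = '*' <;>
    by_cases h4 : c = '/' <;> simp [h1, h2, h3, h4]

-- ===== VERDICT (by name: the statement is the Claim_ definition above) =====
theorem SplitByOperators_spec : Claim_equal_SplitByOperators := by
  intro s _
  unfold Spec_SplitByOperators
  have hs : s = String.ofList s.toList := by simp
  rw [hs, A_char]
  simp only [SplitByOperators_alt, String.toList_ofList]
  rw [B_scan ("+-*/".toList.contains ·) s.toList [] []]
  rw [splitPair_congr (p := fun c => ((c == '+' || c == '-') || c == '*') || c == '/')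
      (q := ("+-*/".toList.contains ·)) pred_eq]
  simp
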